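-- pv_equiv track=rewrite | github.com/Asad-U-Khan/Information-Retrieval-Models | Boolean Retreival Model/Positional_Index.py | execute_proximity_query
-- ===== SOURCE A (Python) =====
-- def execute_proximity_query(positional_index, term1, term2, distance):
--     matching_documents = []
--
--     if term1 not in positional_index or term2 not in positional_index:
--         return matching_documents
--
--     # Iterate over documents containing term1
--     for document in positional_index[term1].keys():
--         if document in positional_index[term2]:
--             positions1 = positional_index[term1][document]
--             positions2 = positional_index[term2][document]
--
--             # Check positional proximity
--             for pos1 in positions1:
--                 for pos2 in positions2:
--                     if abs(pos1 - pos2) <= distance: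
--                         matching_documents.append(document)
--                         break  # Break if a match is found within proximity
--
--     return matching_documents
-- ===== SOURCE B (Python) =====
-- def execute_proximity_query(positional_index, term1, term2, distance):
--     docs1 = positional_index.get(term1)
--     docs2 = positional_index.get(term2)
--     if docs1 is None or docs2 is None:
--         return []
--     matching_documents = []
--     for document in docs1:
--         positions2 = docs2.get(document)
--         if positions2 is None:
--             continue
--         p1s = sorted(docs1[document])
--         p2s = sorted(positions2)
--         m = len(p2s)
--         j = 0
--         count = 0
--         for pos1 in p1s:
--             while j < m and p2s[j] < pos1 - distance:
--                 j += 1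
--             if j < m and p2s[j] <= pos1 + distance:
--                 count += 1
--         matching_documents.extend([document] * count)
--     return matching_documents
-- ===== Notes on version B (the rewrite author's own statement) =====
-- stated objective: alternative
-- what changed: Per document B sorts both position lists once and runs a single two-pointer merge: a pointer into the sorted second list is advanced monotonically past positions below pos1-distance, so each pos1 is answered in amortised O(1) instead of A's inner linear scan of positions2 for every pos1.
import Mathlib
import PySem

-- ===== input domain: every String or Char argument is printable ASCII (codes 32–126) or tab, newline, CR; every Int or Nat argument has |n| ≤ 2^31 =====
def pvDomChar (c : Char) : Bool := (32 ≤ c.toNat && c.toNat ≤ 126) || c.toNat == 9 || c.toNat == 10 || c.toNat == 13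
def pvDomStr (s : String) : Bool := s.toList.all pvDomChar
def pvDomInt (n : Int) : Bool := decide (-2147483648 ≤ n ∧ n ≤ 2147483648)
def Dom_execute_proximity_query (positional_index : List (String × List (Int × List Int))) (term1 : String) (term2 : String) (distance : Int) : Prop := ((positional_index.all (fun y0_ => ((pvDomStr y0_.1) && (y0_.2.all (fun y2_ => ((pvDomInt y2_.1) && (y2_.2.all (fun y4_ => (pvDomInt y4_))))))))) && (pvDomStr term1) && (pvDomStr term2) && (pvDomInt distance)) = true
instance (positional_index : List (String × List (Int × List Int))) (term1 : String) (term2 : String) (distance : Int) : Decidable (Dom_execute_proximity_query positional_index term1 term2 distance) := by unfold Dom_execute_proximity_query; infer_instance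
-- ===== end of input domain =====

-- B replaces A's inner linear scan of positions2 for every pos1 by one sort of each position
-- list per document followed by a single two-pointer merge (objective: alternative algorithm).

-- ===== PORT A =====
-- the inner 'for pos2 in positions2: if abs(pos1 - pos2) <= distance: matching.append(document); break'
def pvScanA (acc : List Int) (document pos1 dist : Int) : List Int → List Int
  | [] => acc
  | pos2 :: rest =>
    if |pos1 - pos2| ≤ dist then acc ++ [document]
    else pvScanA acc document pos1 dist rest

def execute_proximity_query (positional_index : List (String × List (Int × List Int))) (term1 : String) (term2 : String) (distance : Int) : List Int :=
  -- 'term1 not in positional_index or term2 not in positional_index'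
  if !(positional_index.any (fun p => p.1 == term1)) || !(positional_index.any (fun p => p.1 == term2)) then []
  else
    -- positional_index[term1] / positional_index[term2] (guarded, so the lookup succeeds)
    let d1 := ((positional_index.find? (fun p => p.1 == term1)).map (·.2)).getD []
    let d2 := ((positional_index.find? (fun p => p.1 == term2)).map (·.2)).getD []
    -- 'for document in positional_index[term1].keys(): if document in positional_index[term2]:'
    (d1.map (·.1)).foldl (fun acc document =>
      if d2.any (fun q => q.1 == document) then
        let positions1 := ((d1.find? (fun q => q.1 == document)).map (·.2)).getD []
        let positions2 := ((d2.find? (fun q => q.1 == document)).map (·.2)).getD []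
        positions1.foldl (fun acc pos1 => pvScanA acc document pos1 distance positions2) acc
      else acc) []

-- ===== PORT B =====
-- '.get(k)': first-match association lookup, None when absent
def pvGet {α β : Type} [BEq α] : List (α × β) → α → Option β
  | [], _ => none
  | kv :: rest, k => if kv.1 == k then some kv.2 else pvGet rest k

-- 'while j < m and p2s[j] < lo: j += 1'
def pvSkip (p2s : List Int) (lo : Int) (j : Nat) : Nat :=
  if h : j < p2s.length then
    if p2s[j] < lo then pvSkip p2s lo (j + 1) else j
  else j
  termination_by p2s.length - j

-- 'for pos1 in p1s: … j …; if j < m and p2s[j] <= pos1 + distance: count += 1'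
def pvMerge (p2s : List Int) (dist : Int) : List Int → Nat → Int → Int
  | [], _, count => count
  | pos1 :: rest, j, count =>
    let k := pvSkip p2s (pos1 - dist) j
    if h : k < p2s.length then
      if p2s[k] ≤ pos1 + dist then pvMerge p2s dist rest k (count + 1)
      else pvMerge p2s dist rest k count
    else pvMerge p2s dist rest k count

-- 'for document in docs1: …', emitting each document's block '[document] * count'
def pvDocLoop (docs1 docs2 : List (Int × List Int)) (dist : Int) : List (Int × List Int) → List Int
  | [] => []
  | entry :: rest =>
    match pvGet docs2 entry.1 with
    | none => pvDocLoop docs1 docs2 dist rest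
    | some positions2 =>
      let p1s := PySem.List.sorted ((pvGet docs1 entry.1).getD []) (fun x => x) false
      let p2s := PySem.List.sorted positions2 (fun x => x) false
      PySem.List.pyRepeat [entry.1] (pvMerge p2s dist p1s 0 0) ++ pvDocLoop docs1 docs2 dist rest

def execute_proximity_query_alt (positional_index : List (String × List (Int × List Int))) (term1 : String) (term2 : String) (distance : Int) : List Int :=
  match pvGet positional_index term1, pvGet positional_index term2 with
  | some docs1, some docs2 => pvDocLoop docs1 docs2 distance docs1
  | _, _ => []

-- ===== PRECONDITION & SPEC =====
def Spec_execute_proximity_query (positional_index : List (String × List (Int × List Int))) (term1 : String) (term2 : String) (distance : Int) (out : List Int) : Prop := out = execute_proximity_query_alt positional_index term1 term2 distance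
instance (positional_index : List (String × List (Int × List Int))) (term1 : String) (term2 : String) (distance : Int) (out : List Int) : Decidable (Spec_execute_proximity_query positional_index term1 term2 distance out) := by unfold Spec_execute_proximity_query; infer_instance

-- ===== CLAIM =====
def Claim_equal_execute_proximity_query : Prop := ∀ (positional_index : List (String × List (Int × List Int))) (term1 : String) (term2 : String) (distance : Int), Dom_execute_proximity_query positional_index term1 term2 distance → Spec_execute_proximity_query positional_index term1 term2 distance (execute_proximity_query positional_index term1 term2 distance)

-- ===== LEMMAS AND PROOFS =====

-- pvGet is the first-match lookup A's port spells with find?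
lemma pvGet_eq_find? {α β : Type} [BEq α] (l : List (α × β)) (k : α) :
    pvGet l k = (l.find? (fun p => p.1 == k)).map (·.2) := by
  induction l with
  | nil => rfl
  | cons kv rest ih =>
    by_cases h : kv.1 == k
    · simp [pvGet, h, List.find?]
    · simp [pvGet, h, List.find?, ih]

lemma pvGet_isSome_iff_any {α β : Type} [BEq α] (l : List (α × β)) (k : α) :
    (pvGet l k).isSome = l.any (fun p => p.1 == k) := by
  rw [pvGet_eq_find?]
  cases hf : l.find? (fun p => p.1 == k) with
  | none =>
    have := List.find?_eq_none.1 hf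
    simp only [Option.map_none, Option.isSome_none]
    exact (List.any_eq_false.2 fun p hp => by simpa using this p hp).symm
  | some v =>
    simp only [Option.map_some, Option.isSome_some]
    exact (List.any_eq_true.2 ⟨v, List.mem_of_find?_eq_some hf, List.find?_some hf⟩).symm

-- A's break-loop appends the document exactly when some pos2 is within distance
lemma pvScanA_eq_append_if (document pos1 dist : Int) (l acc : List Int) :
    pvScanA acc document pos1 dist l
      = acc ++ (if l.any (fun p2 => |pos1 - p2| ≤ dist) then [document] else []) := by
  induction l with
  | nil => simp [pvScanA]
  | cons p2 rest ih =>
    by_cases h : |pos1 - p2| ≤ dist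
    · simp [pvScanA, h]
    · simp [pvScanA, h, ih]

-- appending [doc] per hit equals appending doc replicated (number of hits) times
lemma foldl_append_if_eq_replicate (p : Int → Bool) (doc : Int) (l acc : List Int) :
    l.foldl (fun acc x => acc ++ (if p x then [doc] else [])) acc
      = acc ++ List.replicate (l.countP p) doc := by
  induction l generalizing acc with
  | nil => simp
  | cons x rest ih =>
    by_cases h : p x
    · simp [h, ih, List.replicate_succ]
    · simp [h, ih]

-- the while-loop: every skipped position is below lo, and the pointer stops at one that is not
lemma pvSkip_spec (p2s : List Int) (lo : Int) (j : Nat)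
    (hinv : ∀ i, i < j → ∀ h : i < p2s.length, p2s[i] < lo) :
    (∀ i, i < pvSkip p2s lo j → ∀ h : i < p2s.length, p2s[i] < lo) ∧
    (∀ h : pvSkip p2s lo j < p2s.length, lo ≤ p2s[pvSkip p2s lo j]) := by
  by_cases h : j < p2s.length
  · by_cases hlt : p2s[j] < lo
    · have ih := pvSkip_spec p2s lo (j + 1) (by
        intro i hi hilen
        rcases Nat.lt_succ_iff_lt_or_eq.1 hi with hij | rfl
        · exact hinv i hij hilen
        · exact hlt)
      rw [pvSkip, dif_pos h, if_pos hlt]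
      exact ih
    · rw [pvSkip, dif_pos h, if_neg hlt]
      exact ⟨hinv, fun _ => not_lt.1 hlt⟩
  · rw [pvSkip, dif_neg h]
    exact ⟨hinv, fun hc => absurd hc h⟩
termination_by p2s.length - j

-- after the skip, the pointer test decides existence of a nearby position (p2s sorted ascending)
lemma pvSkip_hit_iff (p2s : List Int) (hs : p2s.Pairwise (· ≤ ·)) (d x : Int) (j : Nat)
    (hinv : ∀ i, i < j → ∀ h : i < p2s.length, p2s[i] < x - d) :
    (p2s.any (fun y => |x - y| ≤ d) = true)
      ↔ ∃ h : pvSkip p2s (x - d) j < p2s.length, p2s[pvSkip p2s (x - d) j] ≤ x + d := by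
  obtain ⟨hbelow, hstop⟩ := pvSkip_spec p2s (x - d) j hinv
  set k := pvSkip p2s (x - d) j with hk
  constructor
  · intro hany
    obtain ⟨y, hy, hyd⟩ := List.any_eq_true.1 hany
    obtain ⟨i, hi, rfl⟩ := List.mem_iff_getElem.1 hy
    rw [decide_eq_true_iff, abs_sub_le_iff] at hyd
    have hki : k ≤ i := by
      by_contra hcon
      have := hbelow i (by omega) hi
      omega
    have hklen : k < p2s.length := by omega
    refine ⟨hklen, ?_⟩
    have hmono : p2s[k] ≤ p2s[i] := by
      rcases eq_or_lt_of_le hki with rfl | hlt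
      · exact le_refl _
      · exact (List.pairwise_iff_getElem.1 hs) _ _ hklen hi hlt
    omega
  · rintro ⟨hklen, hle⟩
    have hge := hstop hklen
    refine List.any_eq_true.2 ⟨p2s[k], List.getElem_mem hklen, ?_⟩
    rw [decide_eq_true_iff, abs_sub_le_iff]
    omega

-- the two-pointer merge counts the positions of l that have a partner within dist
lemma pvMerge_eq_countP (p2s : List Int) (hs : p2s.Pairwise (· ≤ ·)) (d : Int) :
    ∀ (l : List Int), l.Pairwise (· ≤ ·) → ∀ (j : Nat) (c : Int),
      (∀ x ∈ l, ∀ i, i < j → ∀ h : i < p2s.length, p2s[i] < x - d) →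
      pvMerge p2s d l j c = c + (l.countP (fun x => p2s.any (fun y => |x - y| ≤ d)) : Int)
  | [], _, j, c, _ => by simp [pvMerge]
  | x :: rest, hl, j, c, hinv => by
    have hx : ∀ i, i < j → ∀ h : i < p2s.length, p2s[i] < x - d :=
      hinv x (List.mem_cons_self)
    have hrest : ∀ x' ∈ rest, x ≤ x' := fun x' hx' => (List.pairwise_cons.1 hl).1 x' hx'
    have hinv' : ∀ x' ∈ rest, ∀ i, i < pvSkip p2s (x - d) j → ∀ h : i < p2s.length,
        p2s[i] < x' - d := by
      intro x' hx' i hi hilen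
      have := (pvSkip_spec p2s (x - d) j hx).1 i hi hilen
      have := hrest x' hx'
      omega
    have ih := pvMerge_eq_countP p2s hs d rest (List.Pairwise.sublist (List.sublist_cons_self x rest) hl)
    have hiff := pvSkip_hit_iff p2s hs d x j hx
    rw [List.countP_cons]
    by_cases hklen : pvSkip p2s (x - d) j < p2s.length
    · by_cases hle : p2s[pvSkip p2s (x - d) j] ≤ x + d
      · have hany : p2s.any (fun y => |x - y| ≤ d) = true := hiff.2 ⟨hklen, hle⟩
        rw [pvMerge, dif_pos hklen, if_pos hle, ih _ (c + 1) hinv', hany]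
        push_cast
        simp
        omega
      · have hany : ¬ p2s.any (fun y => |x - y| ≤ d) = true := by
          intro hc
          exact hle (hiff.1 hc).choose_spec
        rw [pvMerge, dif_pos hklen, if_neg hle, ih _ c hinv']
        simp [hany]
    · have hany : ¬ p2s.any (fun y => |x - y| ≤ d) = true := by
        intro hc
        exact hklen (hiff.1 hc).choose
      rw [pvMerge, dif_neg hklen, ih _ c hinv']
      simp [hany]

-- one document's block is identical in A's fold and in B's merge
lemma block_eq (d1 d2 : List (Int × List Int)) (doc dist : Int) (acc : List Int)
    (ps2 : List Int) (hget : pvGet d2 doc = some ps2) :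
    let positions1 := ((d1.find? (fun q => q.1 == doc)).map (·.2)).getD []
    let positions2 := ((d2.find? (fun q => q.1 == doc)).map (·.2)).getD []
    positions1.foldl (fun acc pos1 => pvScanA acc doc pos1 dist positions2) acc
      = acc ++ PySem.List.pyRepeat [doc]
          (pvMerge (PySem.List.sorted ps2 (fun x => x) false) dist
            (PySem.List.sorted ((pvGet d1 doc).getD []) (fun x => x) false) 0 0) := by
  intro positions1 positions2
  have hps2 : positions2 = ps2 := by
    have h := hget
    rw [pvGet_eq_find?] at h
    cases hf : d2.find? (fun q => q.1 == doc) with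
    | none => rw [hf] at h; simp at h
    | some v =>
      rw [hf] at h
      simp only [Option.map_some, Option.some.injEq] at h
      simp [positions2, hf, h]
  have hps1 : (pvGet d1 doc).getD [] = positions1 := by
    simp only [positions1, pvGet_eq_find?]
  set p1s := PySem.List.sorted ((pvGet d1 doc).getD []) (fun x => x) false with hp1s
  set p2s := PySem.List.sorted ps2 (fun x => x) false with hp2s
  have hs2 : p2s.Pairwise (· ≤ ·) := PySem.List.sorted_pairwise ps2 (fun x => x)
  have hs1 : p1s.Pairwise (· ≤ ·) := PySem.List.sorted_pairwise _ (fun x => x)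
  have hperm2 : p2s.Perm ps2 := PySem.List.sorted_perm ps2 (fun x => x) false
  have hperm1 : p1s.Perm positions1 := hps1 ▸ PySem.List.sorted_perm _ (fun x => x) false
  have hmerge := pvMerge_eq_countP p2s hs2 dist p1s hs1 0 0 (by intro _ _ i hi _; omega)
  calc positions1.foldl (fun acc pos1 => pvScanA acc doc pos1 dist positions2) acc
      = positions1.foldl
          (fun acc pos1 => acc ++ (if positions2.any (fun p2 => |pos1 - p2| ≤ dist) then [doc] else [])) acc := by
        congr 1
        funext acc pos1
        exact pvScanA_eq_append_if doc pos1 dist positions2 acc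
    _ = acc ++ List.replicate (positions1.countP (fun pos1 => positions2.any (fun p2 => |pos1 - p2| ≤ dist))) doc := by
        exact foldl_append_if_eq_replicate _ doc positions1 acc
    _ = _ := by
        rw [hmerge, PySem.List.pyRepeat_singleton]
        have hcnt : p1s.countP (fun x => p2s.any (fun y => |x - y| ≤ dist))
            = positions1.countP (fun pos1 => positions2.any (fun p2 => |pos1 - p2| ≤ dist)) := by
          rw [hperm1.countP_eq]
          exact List.countP_congr (fun x _ => by rw [hperm2.any_eq, hps2])
        rw [hcnt]
        simp

-- A's fold over the document keys produces B's concatenation of per-document blocks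
lemma fold_eq_docLoop (d1 d2 : List (Int × List Int)) (dist : Int) :
    ∀ (cur : List (Int × List Int)) (acc : List Int),
      (cur.map (·.1)).foldl (fun acc document =>
        if d2.any (fun q => q.1 == document) then
          let positions1 := ((d1.find? (fun q => q.1 == document)).map (·.2)).getD []
          let positions2 := ((d2.find? (fun q => q.1 == document)).map (·.2)).getD []
          positions1.foldl (fun acc pos1 => pvScanA acc document pos1 dist positions2) acc
        else acc) acc
      = acc ++ pvDocLoop d1 d2 dist cur
  | [], acc => by simp [pvDocLoop]
  | entry :: rest, acc => by
    have hmem : d2.any (fun q => q.1 == entry.1) = (pvGet d2 entry.1).isSome :=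
      (pvGet_isSome_iff_any d2 entry.1).symm
    cases hget : pvGet d2 entry.1 with
    | none =>
      have hfalse : d2.any (fun q => q.1 == entry.1) = false := by
        rw [hmem, hget]; rfl
      simp only [List.map_cons, List.foldl_cons, hfalse, Bool.false_eq_true, if_false]
      rw [fold_eq_docLoop d1 d2 dist rest acc]
      simp [pvDocLoop, hget]
    | some ps2 =>
      have htrue : d2.any (fun q => q.1 == entry.1) = true := by
        rw [hmem, hget]; rfl
      simp only [List.map_cons, List.foldl_cons, htrue, if_true]
      rw [fold_eq_docLoop d1 d2 dist rest _, block_eq d1 d2 entry.1 dist acc ps2 hget]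
      simp [pvDocLoop, hget]

-- ===== VERDICT =====
theorem execute_proximity_query_spec : Claim_equal_execute_proximity_query := by
  intro positional_index term1 term2 distance _hdom
  unfold Spec_execute_proximity_query execute_proximity_query execute_proximity_query_alt
  cases hg1 : pvGet positional_index term1 with
  | none =>
    have : positional_index.any (fun p => p.1 == term1) = false := by
      rw [← pvGet_isSome_iff_any, hg1]; rfl
    simp [this]
  | some docs1 =>
    cases hg2 : pvGet positional_index term2 with
    | none =>
      have : positional_index.any (fun p => p.1 == term2) = false := by
        rw [← pvGet_isSome_iff_any, hg2]; rfl
      simp [this]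
    | some docs2 =>
      have h1 : positional_index.any (fun p => p.1 == term1) = true := by
        rw [← pvGet_isSome_iff_any, hg1]; rfl
      have h2 : positional_index.any (fun p => p.1 == term2) = true := by
        rw [← pvGet_isSome_iff_any, hg2]; rfl
      have hd1 : ((positional_index.find? (fun p => p.1 == term1)).map (·.2)).getD [] = docs1 := by
        rw [← pvGet_eq_find?, hg1]; rfl
      have hd2 : ((positional_index.find? (fun p => p.1 == term2)).map (·.2)).getD [] = docs2 := by
        rw [← pvGet_eq_find?, hg2]; rfl
      simp only [h1, h2, Bool.not_true, Bool.or_self, Bool.false_eq_true, if_false, hd1, hd2]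
      rw [fold_eq_docLoop docs1 docs2 distance docs1 []]
      simp
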